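-- pv_equiv track=rewrite | github.com/akapug/elide-showcases | original/showcases/ml-api/ml/preprocessing.py | extract_punctuation_features
-- ===== SOURCE A (Python) =====
-- from typing import List, Dict, Tuple, Set, Optional
--
-- def extract_punctuation_features(text: str) -> Dict[str, int]:
--     """
--     Extract punctuation features
--     """
--     return {
--         'exclamation_count': text.count('!'),
--         'question_count': text.count('?'),
--         'period_count': text.count('.'),
--         'comma_count': text.count(','),
--         'uppercase_count': sum(1 for c in text if c.isupper()),
--     }
-- ===== SOURCE B (Python) =====
-- def extract_punctuation_features(text: str):
--     """Build a character histogram once; punctuation counts are O(1) lookups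
--     and the uppercase count is summed over the distinct characters."""
--     freq = {}
--     for c in text:
--         freq[c] = freq.get(c, 0) + 1
--     return {
--         'exclamation_count': freq.get('!', 0),
--         'question_count': freq.get('?', 0),
--         'period_count': freq.get('.', 0),
--         'comma_count': freq.get(',', 0),
--         'uppercase_count': sum(n for c, n in freq.items() if c.isupper()),
--     }
-- ===== Notes on version B (the rewrite author's own statement) =====
-- stated objective: alternative
-- what changed: Replaces four substring .count() scans plus a per-character generator-sum with a character histogram (dict) built once: punctuation counts become dictionary lookups and the uppercase count is a sum over the distinct characters' frequencies.
import Mathlib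
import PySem

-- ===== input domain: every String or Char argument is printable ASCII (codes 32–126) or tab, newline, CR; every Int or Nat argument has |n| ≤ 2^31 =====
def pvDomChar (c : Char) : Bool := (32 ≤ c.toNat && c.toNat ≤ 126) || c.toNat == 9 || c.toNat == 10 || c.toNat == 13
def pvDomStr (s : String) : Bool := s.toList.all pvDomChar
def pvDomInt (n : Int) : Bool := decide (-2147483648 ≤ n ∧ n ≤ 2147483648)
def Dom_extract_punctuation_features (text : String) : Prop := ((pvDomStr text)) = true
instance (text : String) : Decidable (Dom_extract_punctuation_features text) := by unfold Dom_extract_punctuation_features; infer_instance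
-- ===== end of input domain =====

-- B replaces A's four substring .count() scans plus a per-character generator-sum with a
-- character histogram built once; punctuation counts become dictionary lookups and the
-- uppercase count is a sum over the distinct characters' frequencies (alternative, same cost).

-- ===== PORT A =====
-- literal port: four str.count calls plus sum(1 for c in text if c.isupper())
def extract_punctuation_features (text : String) : List (String × Int) :=
  [("exclamation_count", (PySem.Str.count text "!" : Int)),
   ("question_count", (PySem.Str.count text "?" : Int)),
   ("period_count", (PySem.Str.count text "." : Int)),
   ("comma_count", (PySem.Str.count text "," : Int)),
   ("uppercase_count",
     (((text.toList.filter (fun c => PySem.Chars.isupper c)).map (fun _ => (1 : Int))).sum))]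

-- ===== PORT B =====
-- literal port of Source B: histogram dict freq[c] = freq.get(c, 0) + 1, then lookups and an
-- items-sum over uppercase keys
def extract_punctuation_features_alt (text : String) : List (String × Int) :=
  let freq : PySem.Dict Char Int :=
    text.toList.foldl (fun d c => d.insert c (d.getD c 0 + 1)) PySem.Dict.empty
  [("exclamation_count", freq.getD '!' 0),
   ("question_count", freq.getD '?' 0),
   ("period_count", freq.getD '.' 0),
   ("comma_count", freq.getD ',' 0),
   ("uppercase_count",
     ((freq.items.filter (fun p => PySem.Chars.isupper p.1)).map (·.2)).sum)]

-- ===== PRECONDITION & SPEC =====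
def Spec_extract_punctuation_features (text : String) (out : List (String × Int)) : Prop := out = extract_punctuation_features_alt text
instance (text : String) (out : List (String × Int)) : Decidable (Spec_extract_punctuation_features text out) := by unfold Spec_extract_punctuation_features; infer_instance

-- ===== CLAIM =====
def Claim_equal_extract_punctuation_features : Prop := ∀ (text : String), Dom_extract_punctuation_features text → Spec_extract_punctuation_features text (extract_punctuation_features text)

-- ===== LEMMAS AND PROOFS =====

-- Chars.count with a single-character needle is plain character counting.
theorem count_go_singleton (c : Char) :
    ∀ (s : List Char) (acc : Nat),
      PySem.Chars.count.go [c] s.length s acc = acc + s.count c := by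
  intro s
  induction s with
  | nil => intro acc; simp [PySem.Chars.count.go]
  | cons h t ih =>
      intro acc
      simp only [List.length_cons, PySem.Chars.count.go, List.isPrefixOf]
      by_cases hc : h = c
      · subst hc
        simp [ih]; omega
      · have : (c == h) = false := by simp; exact fun e => hc e.symm
        simp [this, ih, hc]

theorem count_singleton (s : List Char) (c : Char) :
    PySem.Chars.count s [c] = s.count c := by
  simpa using count_go_singleton c s 0

-- PySem's first-occurrence dedup is a permutation of Mathlib's last-occurrence dedup.
theorem ofList_perm_dedup (l : List Char) : (PySem.Set.ofList l : List Char).Perm l.dedup := by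
  rw [List.perm_ext_iff_of_nodup (PySem.Set.nodup_ofList l) l.nodup_dedup]
  intro a
  simp [PySem.Set.mem_ofList, List.mem_dedup]

-- The histogram's uppercase-keyed values sum to the number of uppercase characters.
theorem counter_upper_sum (l : List Char) :
    ((((PySem.Dict.counter l).items.filter (fun p => PySem.Chars.isupper p.1)).map (·.2)).sum : Int)
      = (l.countP (fun c => PySem.Chars.isupper c) : Int) := by
  rw [PySem.Dict.items_counter]
  rw [List.filter_map, List.map_map]
  have hperm : ((PySem.Set.ofList l : List Char).filter (fun c => PySem.Chars.isupper c)).Perm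
      (l.dedup.filter (fun c => PySem.Chars.isupper c)) := (ofList_perm_dedup l).filter _
  have := (hperm.map (fun k => (l.count k : Int))).sum_eq
  simp only [Function.comp_def]
  rw [this]
  have := List.sum_map_count_dedup_filter_eq_countP (fun c => PySem.Chars.isupper c) l
  calc ((l.dedup.filter (fun c => PySem.Chars.isupper c)).map (fun k => (l.count k : Int))).sum
      = (((l.dedup.filter (fun c => PySem.Chars.isupper c)).map l.count).sum : Int) := by
        simp [Nat.cast_list_sum, List.map_map, Function.comp_def]
    _ = (l.countP (fun c => PySem.Chars.isupper c) : Int) := by rw [this]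

-- ===== VERDICT =====
theorem extract_punctuation_features_spec : Claim_equal_extract_punctuation_features := by
  unfold Claim_equal_extract_punctuation_features
  intro text _
  unfold Spec_extract_punctuation_features
  unfold extract_punctuation_features extract_punctuation_features_alt
  rw [PySem.Dict.foldl_insert_getD_add_one_eq_counter]
  have hb : ("!" : String).toList = ['!'] := by decide
  have hq : ("?" : String).toList = ['?'] := by decide
  have hp : ("." : String).toList = ['.'] := by decide
  have hc : ("," : String).toList = [','] := by decide
  simp only [PySem.Str.count_eq, hb, hq, hp, hc, count_singleton,
    PySem.Dict.getD_counter, counter_upper_sum]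
  simp [List.map_const', List.sum_replicate, List.countP_eq_length_filter]
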